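-- pv_equiv track=rewrite | github.com/automl/DAC | dac/envs/toy_env.py | luby_gen
-- ===== SOURCE A (Python) =====
-- def luby_gen(i):
--     for k in range(1, 33):
--         if i == ((1 << k) - 1):
--             yield 1 << (k-1)
--     for k in range(1, 9999):
--         if 1 << (k - 1) <= i < (1 << k) - 1:
--             for x in luby_gen(i - (1 << (k-1)) + 1):
--                 yield x
-- ===== SOURCE B (Python) =====
-- def luby_gen(i):
--     # Iterative: find the bracketing power of two directly via bit_length
--     # instead of scanning k = 1..9998; tail recursion becomes a loop.
--     while i >= 1:
--         k = i.bit_length()          # 2**(k-1) <= i < 2**k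
--         if i == (1 << k) - 1:
--             yield 1 << (k - 1)
--             return
--         i = i - (1 << (k - 1)) + 1
-- ===== Notes on version B (the rewrite author's own statement) =====
-- stated objective: faster
-- what changed: Replaces the recursive generator that linearly scans k = 1..32 and k = 1..9998 for the bracketing power of two with an iterative loop that computes k directly via bit_length.
import Mathlib
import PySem

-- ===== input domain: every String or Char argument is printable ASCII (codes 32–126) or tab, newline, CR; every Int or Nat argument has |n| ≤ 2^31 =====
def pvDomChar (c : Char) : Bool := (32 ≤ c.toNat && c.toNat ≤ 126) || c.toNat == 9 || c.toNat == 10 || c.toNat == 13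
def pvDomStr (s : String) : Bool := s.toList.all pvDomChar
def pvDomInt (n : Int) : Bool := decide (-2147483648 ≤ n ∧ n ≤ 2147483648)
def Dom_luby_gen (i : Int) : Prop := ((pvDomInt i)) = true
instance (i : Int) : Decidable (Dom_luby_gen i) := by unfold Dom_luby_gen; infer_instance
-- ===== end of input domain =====

-- B replaces A's recursive generator, which scans k = 1..32 and k = 1..9998 for the
-- bracketing power of two, by an iterative loop computing k directly via bit_length.

-- ===== PORT A =====
-- Fuel-based transliteration of the recursive generator; fuel i.toNat + 1 always
-- suffices (each recursive call is made on a strictly smaller positive argument).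
-- '1 << k' for the nonnegative loop variable k is ported exactly as 2 ^ k.toNat.
def lubyA : Nat → Int → List Int
  | 0, _ => []
  | fuel+1, i =>
    -- for k in range(1, 33): if i == (1 << k) - 1: yield 1 << (k-1)
    let ys1 := (PySem.List.pyRange 1 33 1).foldl
      (fun acc k => if i = 2 ^ k.toNat - 1 then acc ++ [(2 : Int) ^ (k.toNat - 1)] else acc) []
    -- for k in range(1, 9999): if 1 << (k-1) <= i < (1 << k) - 1: yield from luby_gen(i - (1 << (k-1)) + 1)
    (PySem.List.pyRange 1 9999 1).foldl
      (fun acc k => if 2 ^ (k.toNat - 1) ≤ i ∧ i < 2 ^ k.toNat - 1 then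
          acc ++ lubyA fuel (i - 2 ^ (k.toNat - 1) + 1) else acc) ys1

def luby_gen (i : Int) : List Int := lubyA (i.toNat + 1) i

-- ===== PORT B =====
-- Source B's loop 'while i >= 1: k = i.bit_length(); …' run on the Nat i.toNat;
-- bit_length is Nat.size; fuel i.toNat suffices (i strictly decreases each turn).
def lubyB : Nat → Nat → List Int
  | 0, _ => []
  | fuel+1, n =>
    if n ≥ 1 then
      let k := n.size
      if n = 2 ^ k - 1 then [(2 : Int) ^ (k - 1)]
      else lubyB fuel (n - 2 ^ (k - 1) + 1)
    else []

def luby_gen_alt (i : Int) : List Int := lubyB i.toNat i.toNat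

-- ===== PRECONDITION & SPEC =====
def Spec_luby_gen (i : Int) (out : List Int) : Prop := out = luby_gen_alt i
instance (i : Int) (out : List Int) : Decidable (Spec_luby_gen i out) := by unfold Spec_luby_gen; infer_instance

-- ===== CLAIM (what is proved, stated in full; the proofs are below) =====
def Claim_equal_luby_gen : Prop := ∀ (i : Int), Dom_luby_gen i → Spec_luby_gen i (luby_gen i)

-- ===== LEMMAS AND PROOFS =====

-- 'for x in l: if p x: out += g x' as filter + flatMap
theorem pvFoldlIteFlatMap {α β : Type} (p : α → Prop) [DecidablePred p] (g : α → List β)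
    (l : List α) : ∀ (acc : List β),
    l.foldl (fun a x => if p x then a ++ g x else a) acc
      = acc ++ (l.filter (fun x => decide (p x))).flatMap g := by
  induction l with
  | nil => intro acc; simp
  | cons b t ih =>
    intro acc
    by_cases h : p b <;> simp [List.foldl_cons, h, ih]

theorem pvFilterEqSingleton {α : Type} {l : List α} {p : α → Bool} {a : α}
    (hnd : l.Nodup) (ha : a ∈ l) (hp : ∀ x ∈ l, p x = true ↔ x = a) :
    l.filter p = [a] := by
  induction l with
  | nil => cases ha
  | cons b t ih =>
    rcases List.nodup_cons.mp hnd with ⟨hbt, hndt⟩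
    by_cases hb : b = a
    · subst hb
      have hft : t.filter p = [] := by
        refine List.filter_eq_nil_iff.mpr (fun x hx hpx => ?_)
        have := (hp x (List.mem_cons_of_mem _ hx)).mp hpx
        exact hbt (this ▸ hx)
      simp [(hp b (List.mem_cons_self)).mpr rfl, hft]
    · have hmem : a ∈ t := by
        rcases List.mem_cons.mp ha with h | h
        · exact absurd h.symm hb
        · exact h
      have hpb : p b = false := by
        by_contra hc
        exact hb ((hp b (List.mem_cons_self)).mp (by simpa using hc))
      simp only [List.filter_cons, hpb, Bool.false_eq_true, if_false]
      exact ih hndt hmem (fun x hx => hp x (List.mem_cons_of_mem _ hx))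

theorem pvSizeOfBounds (k n : Nat) (hk : 1 ≤ k) (h1 : 2^(k-1) ≤ n) (h2 : n < 2^k) :
    n.size = k := by
  have hle : n.size ≤ k := Nat.size_le.mpr h2
  have hlt : k - 1 < n.size := Nat.lt_size.mpr h1
  omega

theorem pvSizeOfBoundsInt (k : Nat) (i : Int) (hk : 1 ≤ k)
    (h1 : (2:Int)^(k-1) ≤ i) (h2 : i < 2^k) : i.toNat.size = k := by
  have hpos : (0:Int) < 2^(k-1) := by positivity
  have hi : 0 ≤ i := le_trans (le_of_lt hpos) h1
  refine pvSizeOfBounds k _ hk ?_ ?_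
  · have : ((2^(k-1) : Nat) : Int) ≤ (i.toNat : Int) := by
      push_cast [Int.toNat_of_nonneg hi]; exact h1
    exact_mod_cast this
  · have : ((i.toNat : Int)) < ((2^k : Nat) : Int) := by
      push_cast [Int.toNat_of_nonneg hi]; exact h2
    exact_mod_cast this

theorem pvPowDouble (k : Nat) (hk : 1 ≤ k) : (2:Int)^k = 2 * 2^(k-1) := by
  conv_lhs => rw [← Nat.sub_add_cancel hk]
  rw [pow_succ]; ring

-- size facts for a positive i within the 2^31 domain
theorem pvSizeBounds (i : Int) (h1 : 1 ≤ i) (h2 : i ≤ 2147483648) :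
    1 ≤ i.toNat.size ∧ i.toNat.size ≤ 32 ∧
    (2:Int)^(i.toNat.size - 1) ≤ i ∧ i < 2^(i.toNat.size) := by
  have hi : 0 ≤ i := by omega
  have hc : ((i.toNat : Int)) = i := Int.toNat_of_nonneg hi
  have hpos : 1 ≤ i.toNat := by omega
  have hs1 : 1 ≤ i.toNat.size := Nat.size_pos.mpr hpos
  have hub : i.toNat < 2^32 := lt_of_le_of_lt (by omega : i.toNat ≤ 2147483648) (by norm_num)
  have hs32 : i.toNat.size ≤ 32 := Nat.size_le.mpr hub
  have hlow : 2^(i.toNat.size - 1) ≤ i.toNat := by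
    have := Nat.lt_size.mp (by omega : i.toNat.size - 1 < i.toNat.size)
    exact this
  have hhigh : i.toNat < 2^(i.toNat.size) := Nat.lt_size_self _
  refine ⟨hs1, hs32, ?_, ?_⟩
  · have : ((2^(i.toNat.size - 1) : Nat) : Int) ≤ ((i.toNat : Int)) := by exact_mod_cast hlow
    rw [hc] at this; push_cast at this; exact this
  · have : ((i.toNat : Int)) < ((2^(i.toNat.size) : Nat) : Int) := by exact_mod_cast hhigh
    rw [hc] at this; push_cast at this; exact this

-- the two filter characterizations
theorem pvMemRangeToNat {a b x : Int} (hx : x ∈ PySem.List.pyRange a b 1) (ha : 0 ≤ a) :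
    a ≤ x ∧ x < b ∧ ((x.toNat : Int)) = x := by
  rcases PySem.List.mem_pyRange_one.mp hx with ⟨h1, h2⟩
  exact ⟨h1, h2, Int.toNat_of_nonneg (le_trans ha h1)⟩

-- key equivalence on positive inputs within the domain
set_option maxRecDepth 10000 in
theorem pvKey : ∀ (N : Nat) (i : Int) (fa fb : Nat), 1 ≤ i → i ≤ 2147483648 →
    i.toNat ≤ N → i.toNat < fa → i.toNat ≤ fb → lubyA fa i = lubyB fb i.toNat := by
  intro N
  induction N with
  | zero => intro i fa fb h1 _ hN _ _; omega
  | succ N ih =>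
    intro i fa fb h1 h2 hN hfa hfb
    obtain ⟨fa', rfl⟩ : ∃ m, fa = m + 1 := ⟨fa - 1, by omega⟩
    obtain ⟨fb', rfl⟩ : ∃ m, fb = m + 1 := ⟨fb - 1, by omega⟩
    obtain ⟨hs1, hs32, hlow, hhigh⟩ := pvSizeBounds i h1 h2
    set k₀ := i.toNat.size with hk₀
    have hdbl := pvPowDouble k₀ hs1
    have hc : ((i.toNat : Int)) = i := Int.toNat_of_nonneg (by omega)
    -- characterize each of A's two filters
    have hA : lubyA (fa' + 1) i =
        ((PySem.List.pyRange 1 33 1).filter (fun k => decide (i = 2 ^ k.toNat - 1))).flatMap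
          (fun k => [(2 : Int) ^ (k.toNat - 1)]) ++
        ((PySem.List.pyRange 1 9999 1).filter
            (fun k => decide (2 ^ (k.toNat - 1) ≤ i ∧ i < 2 ^ k.toNat - 1))).flatMap
          (fun k => lubyA fa' (i - 2 ^ (k.toNat - 1) + 1)) := by
      have h0 : lubyA (fa' + 1) i =
          (PySem.List.pyRange 1 9999 1).foldl
            (fun acc k => if 2 ^ (k.toNat - 1) ≤ i ∧ i < 2 ^ k.toNat - 1 then
                acc ++ lubyA fa' (i - 2 ^ (k.toNat - 1) + 1) else acc)
            ((PySem.List.pyRange 1 33 1).foldl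
              (fun acc k => if i = 2 ^ k.toNat - 1 then acc ++ [(2 : Int) ^ (k.toNat - 1)]
                else acc) []) := rfl
      rw [h0, pvFoldlIteFlatMap (fun k : Int => i = 2 ^ k.toNat - 1)
            (fun k : Int => [(2 : Int) ^ (k.toNat - 1)]),
          pvFoldlIteFlatMap (fun k : Int => 2 ^ (k.toNat - 1) ≤ i ∧ i < 2 ^ k.toNat - 1)
            (fun k : Int => lubyA fa' (i - 2 ^ (k.toNat - 1) + 1))]
      simp
    -- membership facts for k₀
    have hk₀mem33 : ((k₀ : Int)) ∈ PySem.List.pyRange 1 33 1 :=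
      PySem.List.mem_pyRange_one.mpr ⟨by exact_mod_cast hs1, by exact_mod_cast (by omega : k₀ < 33)⟩
    have hk₀mem9999 : ((k₀ : Int)) ∈ PySem.List.pyRange 1 9999 1 :=
      PySem.List.mem_pyRange_one.mpr ⟨by exact_mod_cast hs1, by exact_mod_cast (by omega : k₀ < 9999)⟩
    -- in either case, a matching k forces k = k₀
    have huniq : ∀ x : Int, x ∈ PySem.List.pyRange 1 9999 1 →
        (2:Int) ^ (x.toNat - 1) ≤ i → i < 2 ^ x.toNat → x = (k₀ : Int) := by
      intro x hx hxl hxh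
      rcases pvMemRangeToNat hx (by norm_num) with ⟨hx1, _, hxc⟩
      have hxt : 1 ≤ x.toNat := by omega
      have hsz := pvSizeOfBoundsInt x.toNat i hxt hxl hxh
      rw [← hxc]
      exact_mod_cast (hk₀.trans hsz).symm
    by_cases hterm : i = 2 ^ k₀ - 1
    · -- terminal case: A's first loop fires at k₀, second never
      have hf1 : (PySem.List.pyRange 1 33 1).filter (fun k => decide (i = 2 ^ k.toNat - 1))
          = [(k₀ : Int)] := by
        refine pvFilterEqSingleton (PySem.List.nodup_pyRange_one 1 33) hk₀mem33 ?_
        intro x hx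
        rcases pvMemRangeToNat hx (by norm_num) with ⟨hx1, _, hxc⟩
        simp only [decide_eq_true_eq]
        constructor
        · intro hxeq
          have hxt : 1 ≤ x.toNat := by omega
          have hd := pvPowDouble x.toNat hxt
          have hxl : (2:Int)^(x.toNat - 1) ≤ i := by omega
          have hxh : i < 2 ^ x.toNat := by omega
          have hsz := pvSizeOfBoundsInt x.toNat i hxt hxl hxh
          rw [← hxc]
          exact_mod_cast (hk₀.trans hsz).symm
        · intro hxeq; rw [hxeq]; simpa using hterm
      have hf2 : (PySem.List.pyRange 1 9999 1).filter
          (fun k => decide (2 ^ (k.toNat - 1) ≤ i ∧ i < 2 ^ k.toNat - 1)) = [] := by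
        refine List.filter_eq_nil_iff.mpr (fun x hx => ?_)
        simp only [decide_eq_true_eq, not_and, not_lt]
        intro hxl
        rcases pvMemRangeToNat hx (by norm_num) with ⟨hx1, _, hxc⟩
        have hxt : 1 ≤ x.toNat := by omega
        by_contra hcon
        have hcon : i < 2 ^ x.toNat - 1 := by omega
        have hxh : i < 2 ^ x.toNat := by
          have hd := pvPowDouble x.toNat hxt; omega
        have hsz := pvSizeOfBoundsInt x.toNat i hxt hxl hxh
        have hxk : x.toNat = k₀ := (hk₀.trans hsz).symm
        rw [hxk] at hcon
        omega
      -- B also terminates at k₀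
      have hcc : ((2 ^ k₀ : Nat) : Int) = (2:Int) ^ k₀ := by push_cast; ring
      have hp : (1:Nat) ≤ 2 ^ k₀ := Nat.one_le_two_pow
      have hnterm : i.toNat = 2 ^ k₀ - 1 := by omega
      rw [hA, hf1, hf2]
      show _ = lubyB (fb' + 1) i.toNat
      have e1 : lubyB (fb' + 1) i.toNat =
          if i.toNat = 2 ^ (i.toNat.size) - 1 then [(2:Int) ^ (i.toNat.size - 1)]
          else lubyB fb' (i.toNat - 2 ^ (i.toNat.size - 1) + 1) := by
        simp only [lubyB]
        rw [if_pos (by omega : i.toNat ≥ 1)]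
      rw [e1, if_pos (hk₀ ▸ hnterm)]
      simp [← hk₀]
    · -- recursive case
      have hcc : ((2 ^ k₀ : Nat) : Int) = (2:Int) ^ k₀ := by push_cast; ring
      have hp : (1:Nat) ≤ 2 ^ k₀ := Nat.one_le_two_pow
      have hnterm : i.toNat ≠ 2 ^ k₀ - 1 := by omega
      have hk₀2 : 2 ≤ k₀ := by
        by_contra hcon
        have hk1 : k₀ = 1 := by omega
        rw [hk1] at hlow hhigh
        apply hterm
        rw [hk1]; omega
      have hstrict : i < 2 ^ k₀ - 1 := by
        have : i ≠ 2 ^ k₀ - 1 := hterm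
        omega
      have hf1 : (PySem.List.pyRange 1 33 1).filter (fun k => decide (i = 2 ^ k.toNat - 1))
          = [] := by
        refine List.filter_eq_nil_iff.mpr (fun x hx => ?_)
        simp only [decide_eq_true_eq]
        intro hxeq
        rcases pvMemRangeToNat hx (by norm_num) with ⟨hx1, _, hxc⟩
        have hxt : 1 ≤ x.toNat := by omega
        have hd := pvPowDouble x.toNat hxt
        have hxl : (2:Int)^(x.toNat - 1) ≤ i := by omega
        have hxh : i < 2 ^ x.toNat := by omega
        have hsz := pvSizeOfBoundsInt x.toNat i hxt hxl hxh
        have hxk : x.toNat = k₀ := (hk₀.trans hsz).symm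
        rw [hxk] at hxeq
        exact hterm hxeq
      have hf2 : (PySem.List.pyRange 1 9999 1).filter
          (fun k => decide (2 ^ (k.toNat - 1) ≤ i ∧ i < 2 ^ k.toNat - 1)) = [(k₀ : Int)] := by
        refine pvFilterEqSingleton (PySem.List.nodup_pyRange_one 1 9999) hk₀mem9999 ?_
        intro x hx
        simp only [decide_eq_true_eq]
        constructor
        · rintro ⟨hxl, hxh⟩
          have hxh' : i < 2 ^ x.toNat := by omega
          exact huniq x hx hxl hxh'
        · intro hxeq
          rw [hxeq]
          simp only [Int.toNat_natCast]
          exact ⟨hlow, hstrict⟩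
      rw [hA, hf1, hf2]
      simp only [List.nil_append, List.flatMap_cons, List.flatMap_nil, List.append_nil,
        Int.toNat_natCast]
      -- the recursive argument
      set i' := i - 2 ^ (k₀ - 1) + 1 with hi'
      have hplow : (2:Int) ≤ 2 ^ (k₀ - 1) := by
        calc (2:Int) = 2^1 := by norm_num
        _ ≤ 2^(k₀-1) := by
            apply pow_le_pow_right₀ (by norm_num) (by omega)
      have h1' : 1 ≤ i' := by omega
      have hlt' : i' < i := by omega
      have h2' : i' ≤ 2147483648 := by omega
      have hc' : i'.toNat = i.toNat - 2 ^ (k₀ - 1) + 1 := by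
        have hcc : ((2^(k₀-1) : Nat) : Int) = (2:Int)^(k₀-1) := by push_cast; ring
        omega
      have hrec := ih i' fa' fb' h1' h2' (by omega) (by omega) (by omega)
      rw [hrec]
      show _ = lubyB (fb' + 1) i.toNat
      rw [hc']
      have e1 : lubyB (fb' + 1) i.toNat =
          if i.toNat = 2 ^ (i.toNat.size) - 1 then [(2:Int) ^ (i.toNat.size - 1)]
          else lubyB fb' (i.toNat - 2 ^ (i.toNat.size - 1) + 1) := by
        simp only [lubyB]
        rw [if_pos (by omega : i.toNat ≥ 1)]
      rw [e1, if_neg (hk₀ ▸ hnterm)]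

set_option maxRecDepth 10000 in
theorem pvNonpos (i : Int) (h : i ≤ 0) : lubyA (i.toNat + 1) i = [] := by
  have hf1 : ∀ x : Int, x ∈ PySem.List.pyRange 1 33 1 → ¬ (i = 2 ^ x.toNat - 1) := by
    intro x hx hxeq
    rcases pvMemRangeToNat hx (by norm_num) with ⟨hx1, _, _⟩
    have hxt : 1 ≤ x.toNat := by omega
    have : (2:Int) ≤ 2^x.toNat := by
      calc (2:Int) = 2^1 := by norm_num
      _ ≤ 2^x.toNat := by apply pow_le_pow_right₀ (by norm_num) (by omega)
    omega
  have hf2 : ∀ x : Int, x ∈ PySem.List.pyRange 1 9999 1 →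
      ¬ ((2:Int) ^ (x.toNat - 1) ≤ i ∧ i < 2 ^ x.toNat - 1) := by
    rintro x hx ⟨hxl, _⟩
    have : (0:Int) < 2^(x.toNat - 1) := by positivity
    omega
  have hA : lubyA (i.toNat + 1) i =
      ((PySem.List.pyRange 1 33 1).filter (fun k => decide (i = 2 ^ k.toNat - 1))).flatMap
        (fun k => [(2 : Int) ^ (k.toNat - 1)]) ++
      ((PySem.List.pyRange 1 9999 1).filter
          (fun k => decide (2 ^ (k.toNat - 1) ≤ i ∧ i < 2 ^ k.toNat - 1))).flatMap
        (fun k => lubyA i.toNat (i - 2 ^ (k.toNat - 1) + 1)) := by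
    have h0 : lubyA (i.toNat + 1) i =
        (PySem.List.pyRange 1 9999 1).foldl
          (fun acc k => if 2 ^ (k.toNat - 1) ≤ i ∧ i < 2 ^ k.toNat - 1 then
              acc ++ lubyA i.toNat (i - 2 ^ (k.toNat - 1) + 1) else acc)
          ((PySem.List.pyRange 1 33 1).foldl
            (fun acc k => if i = 2 ^ k.toNat - 1 then acc ++ [(2 : Int) ^ (k.toNat - 1)]
              else acc) []) := rfl
    rw [h0, pvFoldlIteFlatMap (fun k : Int => i = 2 ^ k.toNat - 1)
          (fun k : Int => [(2 : Int) ^ (k.toNat - 1)]),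
        pvFoldlIteFlatMap (fun k : Int => 2 ^ (k.toNat - 1) ≤ i ∧ i < 2 ^ k.toNat - 1)
          (fun k : Int => lubyA i.toNat (i - 2 ^ (k.toNat - 1) + 1))]
    simp
  rw [hA,
    List.filter_eq_nil_iff.mpr (by intro x hx; simpa using hf1 x hx),
    List.filter_eq_nil_iff.mpr (by intro x hx; simpa using hf2 x hx)]
  simp

-- ===== VERDICT (by name: the statement is the Claim_ definition above) =====
set_option maxRecDepth 10000 in
theorem luby_gen_spec : Claim_equal_luby_gen := by
  intro i hdom
  unfold Spec_luby_gen luby_gen luby_gen_alt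
  have hdom' : -2147483648 ≤ i ∧ i ≤ 2147483648 := by
    simpa [Dom_luby_gen, pvDomInt] using hdom
  by_cases h : 1 ≤ i
  · exact pvKey i.toNat i (i.toNat + 1) i.toNat h hdom'.2 le_rfl (by omega) le_rfl
  · have hle : i ≤ 0 := by omega
    have : i.toNat = 0 := by omega
    rw [pvNonpos i hle, this]
    rfl
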